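-- pv_equiv track=rewrite | github.com/JyX33/Auction-Analyzer | src/database/scripts/populate_spell_id.py | clean_item_name
-- ===== SOURCE A (Python) =====
-- def clean_item_name(name: str) -> str:
--     """
--     Clean item name by removing profession prefixes and trimming whitespace.
--
--     Args:
--         name: Raw item name
--
--     Returns:
--         Cleaned item name
--     """
--     # List of profession prefixes to remove
--     prefixes = [
--         "Plans:", "Pattern:", "Design:", "Formula:", "Recipe:",
--         "Technique:", "Schematic:"
--     ]
--
--     # Remove any prefix if present
--     for prefix in prefixes:
--         if name.startswith(prefix):
--             name = name[len(prefix):].strip()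
--             break
--
--     return name
-- ===== SOURCE B (Python) =====
-- _BARE = {"Plans", "Pattern", "Design", "Formula", "Recipe", "Technique", "Schematic"}
--
--
-- def clean_item_name(name: str) -> str:
--     parts = name.split(":", 1)
--     if len(parts) == 2 and parts[0] in _BARE:
--         return parts[1].strip()
--     return name
-- ===== Notes on version B (the rewrite author's own statement) =====
-- stated objective: simpler
-- what changed: Instead of scanning a list of seven profession prefixes with startswith and slicing off the matched prefix, B splits the name once at the first colon and checks the bare head word against a set, stripping the remainder on a hit.
import Mathlib
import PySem

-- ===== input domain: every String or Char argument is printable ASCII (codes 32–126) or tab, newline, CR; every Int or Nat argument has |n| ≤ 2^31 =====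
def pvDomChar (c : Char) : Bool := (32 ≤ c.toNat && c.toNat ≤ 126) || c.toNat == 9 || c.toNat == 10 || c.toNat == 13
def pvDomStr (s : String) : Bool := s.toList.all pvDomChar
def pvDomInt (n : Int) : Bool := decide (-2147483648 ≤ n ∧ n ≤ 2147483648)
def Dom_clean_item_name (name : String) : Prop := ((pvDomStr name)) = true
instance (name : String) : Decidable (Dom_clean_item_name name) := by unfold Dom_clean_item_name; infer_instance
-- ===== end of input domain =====

-- B replaces A's scan over seven "Word:" prefixes by one split at the first colon plus a
-- set-membership test on the bare word (objective: simpler).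

-- ===== PORT A =====
-- the literal prefix list of A
def cleanPrefixes : List String :=
  ["Plans:", "Pattern:", "Design:", "Formula:", "Recipe:", "Technique:", "Schematic:"]

-- A's for-loop with break: try each prefix in order, on the first match slice it off and strip
def cleanLoopA : List String → String → String
  | [], name => name
  | p :: ps, name =>
      if PySem.Str.startswith name p then
        PySem.Str.strip (PySem.Str.slice name (some (PySem.Str.len p)) none)
      else cleanLoopA ps name

def clean_item_name (name : String) : String := cleanLoopA cleanPrefixes name

-- ===== PORT B =====
-- the bare profession names (B's set literal)
def bareNames : List String :=
  ["Plans", "Pattern", "Design", "Formula", "Recipe", "Technique", "Schematic"]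

-- parts = name.split(":", 1); if len(parts) == 2 and parts[0] in _BARE: return parts[1].strip(); return name
def clean_item_name_alt (name : String) : String :=
  match PySem.Str.splitMax? name ":" 1 with
  | some [head, tail] => if bareNames.contains head then PySem.Str.strip tail else name
  | _ => name

-- ===== PRECONDITION & SPEC =====
def Spec_clean_item_name (name : String) (out : String) : Prop := out = clean_item_name_alt name
instance (name : String) (out : String) : Decidable (Spec_clean_item_name name out) := by unfold Spec_clean_item_name; infer_instance

-- ===== CLAIM (what is proved, stated in full; the proofs are below) =====
def Claim_equal_clean_item_name : Prop := ∀ (name : String), Dom_clean_item_name name → Spec_clean_item_name name (clean_item_name name)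

-- ===== LEMMAS AND PROOFS =====

-- splitOnMax.go with maxsplit exhausted returns the tail as the last piece
theorem go_zero (fuel : Nat) (l cur : List Char) (acc : List (List Char)) :
    PySem.Chars.splitOnMax.go [':'] fuel 0 l cur acc = ((cur.reverse ++ l) :: acc).reverse := by
  cases fuel with
  | zero => simp [PySem.Chars.splitOnMax.go]
  | succ n => cases l <;> simp [PySem.Chars.splitOnMax.go]

-- one-split behaviour of splitOnMax.go: cut at the first ':' if any
theorem go_one (fuel : Nat) : ∀ (cs cur : List Char) (acc : List (List Char)),
    cs.length < fuel →
    PySem.Chars.splitOnMax.go [':'] fuel 1 cs cur acc =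
      if ':' ∈ cs then
        acc.reverse ++ [cur.reverse ++ cs.takeWhile (· ≠ ':'),
                        cs.drop ((cs.takeWhile (· ≠ ':')).length + 1)]
      else acc.reverse ++ [cur.reverse ++ cs] := by
  induction fuel with
  | zero => intro cs cur acc h; omega
  | succ n ih =>
    intro cs cur acc h
    cases cs with
    | nil => simp [PySem.Chars.splitOnMax.go]
    | cons c rest =>
      by_cases hc : c = ':'
      · subst hc
        simp [PySem.Chars.splitOnMax.go, go_zero, List.takeWhile]
      · have hc' : (':' : Char) ≠ c := fun h => hc h.symm
        have hlen : rest.length < n := by simpa using h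
        simp only [PySem.Chars.splitOnMax.go]
        rw [if_neg (by simp), if_neg (by simp [List.isPrefixOf]; exact hc')]
        rw [ih rest (c :: cur) acc hlen]
        by_cases hm : ':' ∈ rest
        · simp [hm, hc, hc', List.mem_cons]
        · simp [hm, hc, hc', List.mem_cons]

theorem splitOnMax_one (cs : List Char) :
    PySem.Chars.splitOnMax cs [':'] 1 =
      if ':' ∈ cs then
        [cs.takeWhile (· ≠ ':'), cs.drop ((cs.takeWhile (· ≠ ':')).length + 1)]
      else [cs] := by
  unfold PySem.Chars.splitOnMax
  rw [if_neg (by norm_num)]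
  simp only [Int.toNat_one]
  rw [go_one (cs.length + 1) cs [] [] (by omega)]
  split <;> simp

-- takeWhile (· ≠ ':') of word ++ ':' :: rest is the word, when the word has no colon
theorem takeWhile_word (p r : List Char) (hp : ':' ∉ p) :
    (p ++ ':' :: r).takeWhile (· ≠ ':') = p := by
  induction p with
  | nil => simp
  | cons x xs ih =>
    have hx : x ≠ ':' := fun h => hp (by simp [h])
    have hxs : ':' ∉ xs := fun h => hp (by simp [h])
    have hpx : (fun y => decide (y ≠ ':')) x = true := by simp [hx]
    rw [List.cons_append, List.takeWhile_cons, if_pos hpx, ih hxs]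

-- a list containing ':' splits as takeWhile ++ ':' :: rest
theorem colon_split (cs : List Char) (h : ':' ∈ cs) :
    ∃ r, cs = cs.takeWhile (· ≠ ':') ++ ':' :: r := by
  induction cs with
  | nil => cases h
  | cons c rest ih =>
    by_cases hc : c = ':'
    · subst hc; exact ⟨rest, by simp⟩
    · have h' : ':' ∈ rest := by
        rcases List.mem_cons.mp h with h1 | h1
        · exact absurd h1.symm hc
        · exact h1
      obtain ⟨r, hr⟩ := ih h'
      exact ⟨r, by simpa [List.takeWhile_cons, hc] using congrArg (c :: ·) hr⟩

-- a "Word:" prefix matches iff there is a colon and the text before the first colon is that word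
theorem startswith_colon (p cs : List Char) (hp : ':' ∉ p) :
    p ++ [':'] <+: cs ↔ ':' ∈ cs ∧ cs.takeWhile (· ≠ ':') = p := by
  constructor
  · rintro ⟨r, rfl⟩
    refine ⟨by simp, ?_⟩
    rw [List.append_assoc]
    simpa using takeWhile_word p r hp
  · rintro ⟨hmem, ht⟩
    obtain ⟨r, hr⟩ := colon_split cs hmem
    exact ⟨r, by rw [hr, ht]; simp⟩

-- Str.len of a word-plus-colon literal, as the list length plus one
theorem len_append_colon (b : String) :
    PySem.Str.len (b ++ ":") = (b.toList.length : Int) + 1 := by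
  simp [PySem.Str.len]

-- A's loop over prefixes bs.map (· ++ ":") computes B's split-and-lookup over bs
theorem loop_eq (bs : List String) (hbs : ∀ b ∈ bs, ':' ∉ b.toList) (name : String) :
    cleanLoopA (bs.map (fun b => b ++ ":")) name =
      match PySem.Str.splitMax? name ":" 1 with
      | some [head, tail] => if bs.contains head then PySem.Str.strip tail else name
      | _ => name := by
  induction bs with
  | nil =>
    simp only [List.map_nil, cleanLoopA]
    rcases h : PySem.Str.splitMax? name ":" 1 with _ | l
    · rfl
    · rcases l with _ | ⟨a, _ | ⟨b, _ | _⟩⟩ <;> simp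
  | cons b bs ih =>
    have hb : ':' ∉ b.toList := hbs b (by simp)
    have hbs' : ∀ x ∈ bs, ':' ∉ x.toList := fun x hx => hbs x (by simp [hx])
    have htoL : (b ++ ":").toList = b.toList ++ [':'] := by simp
    simp only [List.map_cons, cleanLoopA]
    have hsplit : PySem.Str.splitMax? name ":" 1 =
        some ((PySem.Chars.splitOnMax name.toList [':'] 1).map String.ofList) := by
      simp [PySem.Str.splitMax?, PySem.Chars.splitMax?]
    by_cases hc : ':' ∈ name.toList
    · -- there is a colon: the split yields two pieces
      set t := name.toList.takeWhile (· ≠ ':') with hT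
      set r := name.toList.drop (t.length + 1) with hR
      have hparts : PySem.Str.splitMax? name ":" 1 = some [String.ofList t, String.ofList r] := by
        rw [hsplit, splitOnMax_one, if_pos hc]; rfl
      by_cases hsw : PySem.Str.startswith name (b ++ ":") = true
      · -- prefix b++":" matches: head is b
        have hpre : b.toList ++ [':'] <+: name.toList := by
          have := (PySem.Chars.startswith_iff name.toList (b ++ ":").toList).mp
            (by simpa [PySem.Str.startswith] using hsw)
          rwa [htoL] at this
        have ht : t = b.toList := ((startswith_colon _ _ hb).mp hpre).2
        have hhead : String.ofList t = b := by rw [ht]; simp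
        rw [if_pos hsw, hparts]
        have hslice : PySem.Str.slice name (some (PySem.Str.len (b ++ ":"))) none
            = String.ofList r := by
          rw [len_append_colon]
          simp only [PySem.Str.slice, PySem.Chars.slice_eq_listSlice]
          have hcast : ((b.toList.length : Int) + 1) = ((b.toList.length + 1 : Nat) : Int) := by
            push_cast; ring
          rw [hcast, PySem.List.slice_from_natCast]
          rw [hR, ht]
        rw [hslice]
        simp [hhead, PySem.Str.strip]
      · -- prefix does not match: head ≠ b, fall through to the rest of the loop
        rw [if_neg hsw, ih hbs', hparts]
        have hne : String.ofList t ≠ b := by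
          intro he
          have ht : t = b.toList := by
            have := congrArg String.toList he
            simpa using this
          refine hsw ?_
          simp only [PySem.Str.startswith]
          rw [PySem.Chars.startswith_iff, htoL]
          exact (startswith_colon _ _ hb).mpr ⟨hc, ht⟩
        simp [hne]
    · -- no colon: the split is a single piece and no prefix can match
      have hparts : PySem.Str.splitMax? name ":" 1 = some [String.ofList name.toList] := by
        rw [hsplit, splitOnMax_one, if_neg hc]; rfl
      have hsw : PySem.Str.startswith name (b ++ ":") ≠ true := by
        intro hsw
        have hpre : b.toList ++ [':'] <+: name.toList := by
          have := (PySem.Chars.startswith_iff name.toList (b ++ ":").toList).mp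
            (by simpa [PySem.Str.startswith] using hsw)
          rwa [htoL] at this
        exact hc ((startswith_colon _ _ hb).mp hpre).1
      rw [if_neg hsw, ih hbs', hparts]

-- ===== VERDICT (by name: the statement is the Claim_ definition above) =====
theorem clean_item_name_spec : Claim_equal_clean_item_name := by
  intro name _
  unfold Spec_clean_item_name clean_item_name clean_item_name_alt
  have hlist : cleanPrefixes = bareNames.map (fun b => b ++ ":") := by decide
  rw [hlist, loop_eq bareNames (by decide) name]
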